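-- pv_equiv track=rewrite | github.com/aunetx/loulou | scripts/utils.py | listToArch
-- ===== SOURCE A (Python) =====
-- def listToArch(list: list) -> list:
--     arch = []
--     id = 0
--     for hl in list:
--         if id == 0:
--             arch.append((784, hl))
--             if id == len(list) - 1:
--                 arch.append((hl, 10))
--         elif id == len(list) - 1:
--             arch.append((lastHl, hl))
--             arch.append((hl, 10))
--         else:
--             arch.append((lastHl, hl))
--         lastHl = hl
--         id += 1
--     return arch
-- ===== SOURCE B (Python) =====
-- def listToArch(list: list) -> list:
--     if not list:
--         return []
--     full = [784] + list + [10]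
--     return [pair for pair in zip(full, full[1:])]
-- ===== Notes on version B (the rewrite author's own statement) =====
-- stated objective: simpler
-- what changed: Instead of A's position-indexed first/middle/last branching with a lastHl carry, B prepends 784 and appends 10 to the layer list and emits consecutive pairs via zip.
import Mathlib
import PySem

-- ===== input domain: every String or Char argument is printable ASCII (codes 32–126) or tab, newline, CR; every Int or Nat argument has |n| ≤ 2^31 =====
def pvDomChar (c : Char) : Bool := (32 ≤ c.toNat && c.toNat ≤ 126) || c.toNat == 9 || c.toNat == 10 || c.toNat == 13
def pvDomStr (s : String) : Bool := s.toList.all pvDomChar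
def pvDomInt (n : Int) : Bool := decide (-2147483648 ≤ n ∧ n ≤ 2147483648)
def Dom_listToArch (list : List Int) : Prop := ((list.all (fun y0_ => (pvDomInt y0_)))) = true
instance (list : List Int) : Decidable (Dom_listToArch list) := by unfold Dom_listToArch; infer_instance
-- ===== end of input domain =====

-- B replaces A's position-indexed first/middle/last branching by augment-with-784/10 then zip of consecutive pairs; objective: simpler.

-- ===== PORT A =====
-- loop body of A: state = (arch, id, lastHl); n = len(list) (fixed during the loop)
def listToArchStep (n : Int) : (List (Int × Int) × Int × Int) → Int → (List (Int × Int) × Int × Int)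
  | (arch, id, lastHl), hl =>
    let arch :=
      if id = 0 then
        if id = n - 1 then (arch ++ [(784, hl)]) ++ [(hl, 10)] else arch ++ [(784, hl)]
      else if id = n - 1 then (arch ++ [(lastHl, hl)]) ++ [(hl, 10)]
      else arch ++ [(lastHl, hl)]
    (arch, id + 1, hl)

-- lastHl is unbound before the first iteration in Python; 0 is a dummy never read at id = 0
def listToArch (list : List Int) : List (Int × Int) :=
  (list.foldl (listToArchStep (list.length : Int)) ([], 0, 0)).1

-- ===== PORT B =====
-- zip(full, full[1:]) : full[1:] on a list is drop 1 (start index 1 ≥ 0)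
def listToArch_alt (list : List Int) : List (Int × Int) :=
  if list = [] then []
  else
    let full : List Int := 784 :: (list ++ [10])
    full.zip (full.drop 1)

-- ===== PRECONDITION & SPEC =====
def Spec_listToArch (list : List Int) (out : List (Int × Int)) : Prop := out = listToArch_alt list
instance (list : List Int) (out : List (Int × Int)) : Decidable (Spec_listToArch list out) := by unfold Spec_listToArch; infer_instance

-- ===== CLAIM (what is proved, stated in full; the proofs are below) =====
def Claim_equal_listToArch : Prop := ∀ (list : List Int), Dom_listToArch list → Spec_listToArch list (listToArch list)

-- ===== LEMMAS AND PROOFS =====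

-- After the first iteration (id ≥ 1), the fold appends exactly the consecutive pairs of last :: ys ++ [10]
theorem listToArch_fold_inv (n : Int) :
    ∀ (ys : List Int) (arch : List (Int × Int)) (id last : Int),
      ys ≠ [] → 1 ≤ id → id + (ys.length : Int) = n →
      (ys.foldl (listToArchStep n) (arch, id, last)).1
        = arch ++ (last :: ys).zip (ys ++ [10]) := by
  intro ys
  induction ys with
  | nil => intro _ _ _ h; exact absurd rfl h
  | cons y ys ih =>
    intro arch id last _ hid hlen
    cases ys with
    | nil =>
      have hidn : id = n - 1 := by simp at hlen; omega
      have hid0 : ¬ id = 0 := by omega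
      simp [List.foldl, listToArchStep, hidn]
      intro h; exact absurd h (by omega)
    | cons z zs =>
      have hid0 : ¬ id = 0 := by omega
      have hidn : ¬ id = n - 1 := by
        simp [List.length_cons] at hlen; omega
      have step : listToArchStep n (arch, id, last) y
          = (arch ++ [(last, y)], id + 1, y) := by
        simp [listToArchStep, hid0, hidn]
      rw [List.foldl_cons, step,
        ih (arch ++ [(last, y)]) (id + 1) y (by simp) (by omega)
          (by simp [List.length_cons] at hlen ⊢; omega)]
      simp

-- dropping a trailing element does not change the zip when the other side has the same length
theorem zip_append_right :
    ∀ (l l2 : List Int) (a : Int), l.length = l2.length →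
      (l ++ [a]).zip l2 = l.zip l2 := by
  intro l
  induction l with
  | nil => intro l2 a h; cases l2 with
    | nil => simp
    | cons c l2 => simp at h
  | cons b l ih =>
    intro l2 a h
    cases l2 with
    | nil => simp at h
    | cons c l2 =>
      simp only [List.cons_append, List.zip_cons_cons]
      rw [ih l2 a (by simpa using h)]

-- ===== VERDICT (by name: the statement is the Claim_ definition above) =====
theorem listToArch_spec : Claim_equal_listToArch := by
  intro list _
  unfold Spec_listToArch
  cases list with
  | nil => simp [listToArch, listToArch_alt]
  | cons x rest =>
    cases rest with
    | nil => simp [listToArch, listToArch_alt, listToArchStep, List.foldl]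
    | cons z zs =>
      have hne : ¬ (0 : Int) = ((zs.length : Int) + 1) := by omega
      have step1 : listToArchStep ((x :: z :: zs : List Int).length : Int) ([], 0, 0) x
          = ([(784, x)], 1, x) := by
        simp [listToArchStep]
        intro h; exact absurd h hne
      rw [listToArch, List.foldl_cons, step1,
        listToArch_fold_inv _ (z :: zs) [(784, x)] 1 x (by simp) (by omega)
          (by simp [List.length_cons]; omega)]
      have hzip : ((z :: zs) ++ [(10 : Int)]).zip (zs ++ [10])
          = (z :: zs).zip (zs ++ [10]) :=
        zip_append_right (z :: zs) (zs ++ [10]) 10 (by simp)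
      simp only [List.cons_append] at hzip
      simp [listToArch_alt, List.zip_cons_cons]
      exact hzip.symm
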